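-- pv_equiv track=rewrite | github.com/humzakh/patcoschedule | patco.py | normalize_station_name
-- ===== SOURCE A (Python) =====
-- def normalize_station_name(name: str, stations: list[str]) -> str | None:
--     """
--     Find matching station name (case-insensitive, partial match).
--     """
--     name_lower = name.lower().strip()
--
--     # Exact match first
--     for s in stations:
--         if s.lower() == name_lower:
--             return s
--
--     # Partial match
--     for s in stations:
--         if name_lower in s.lower() or s.lower() in name_lower:
--             return s
--
--     return None
-- ===== SOURCE B (Python) =====
-- def normalize_station_name(name: str, stations: list[str]) -> str | None:
--     """
--     Find matching station name (case-insensitive, partial match).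
--     Single pass: exact match returns immediately; first partial match is
--     remembered and returned only if no exact match exists anywhere.
--     """
--     name_lower = name.lower().strip()
--     partial = None
--     for s in stations:
--         s_lower = s.lower()
--         if s_lower == name_lower:
--             return s
--         if partial is None and (name_lower in s_lower or s_lower in name_lower):
--             partial = s
--     return partial
-- ===== Notes on version B (the rewrite author's own statement) =====
-- stated objective: alternative
-- what changed: Replaced A's two sequential scans (exact-match pass, then partial-match pass) by a single pass that lowercases each station once, returns on an exact match, and carries the first partial match in an accumulator returned after the loop.
import Mathlib
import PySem

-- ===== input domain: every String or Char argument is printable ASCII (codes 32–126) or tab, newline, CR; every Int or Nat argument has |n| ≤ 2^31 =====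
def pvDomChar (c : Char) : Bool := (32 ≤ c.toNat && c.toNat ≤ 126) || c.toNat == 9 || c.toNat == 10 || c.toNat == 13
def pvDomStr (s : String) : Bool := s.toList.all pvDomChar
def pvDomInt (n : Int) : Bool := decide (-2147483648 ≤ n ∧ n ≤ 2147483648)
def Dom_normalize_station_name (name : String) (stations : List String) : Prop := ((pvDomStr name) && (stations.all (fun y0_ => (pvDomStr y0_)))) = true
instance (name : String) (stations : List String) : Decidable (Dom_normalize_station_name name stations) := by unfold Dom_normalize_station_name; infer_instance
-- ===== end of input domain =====

-- B merges A's two scans into one pass with a first-partial accumulator (alternative decomposition, return value unchanged).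

-- ===== PORT A =====
-- first loop of A: exact case-insensitive match
def nsnA_exact (nl : String) : List String → Option String
  | [] => none
  | s :: rest => if PySem.Str.lower s == nl then some s else nsnA_exact nl rest

-- second loop of A: first partial match
def nsnA_partial (nl : String) : List String → Option String
  | [] => none
  | s :: rest =>
    if PySem.Str.isIn nl (PySem.Str.lower s) || PySem.Str.isIn (PySem.Str.lower s) nl then some s
    else nsnA_partial nl rest

def normalize_station_name (name : String) (stations : List String) : Option String :=
  let name_lower := PySem.Str.strip (PySem.Str.lower name)
  match nsnA_exact name_lower stations with
  | some s => some s
  | none => nsnA_partial name_lower stations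

-- ===== PORT B =====
-- single pass carrying the first partial match seen so far
def nsnB_loop (nl : String) : List String → Option String → Option String
  | [], part => part
  | s :: rest, part =>
    let s_lower := PySem.Str.lower s
    if s_lower == nl then some s
    else nsnB_loop nl rest
      (if part.isNone && (PySem.Str.isIn nl s_lower || PySem.Str.isIn s_lower nl) then some s else part)

def normalize_station_name_alt (name : String) (stations : List String) : Option String :=
  let name_lower := PySem.Str.strip (PySem.Str.lower name)
  nsnB_loop name_lower stations none

-- ===== PRECONDITION & SPEC =====
def Spec_normalize_station_name (name : String) (stations : List String) (out : Option String) : Prop := out = normalize_station_name_alt name stations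
instance (name : String) (stations : List String) (out : Option String) : Decidable (Spec_normalize_station_name name stations out) := by unfold Spec_normalize_station_name; infer_instance

-- ===== CLAIM (what is proved, stated in full; the proofs are below) =====
def Claim_equal_normalize_station_name : Prop := ∀ (name : String) (stations : List String), Dom_normalize_station_name name stations → Spec_normalize_station_name name stations (normalize_station_name name stations)

-- ===== LEMMAS AND PROOFS =====
theorem nsnB_loop_eq (nl : String) (l : List String) :
    ∀ part : Option String,
      nsnB_loop nl l part = (nsnA_exact nl l).or (part.or (nsnA_partial nl l)) := by
  induction l with
  | nil => intro part; simp [nsnB_loop, nsnA_exact, nsnA_partial]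
  | cons s rest ih =>
    intro part
    simp only [nsnB_loop, nsnA_exact, nsnA_partial]
    by_cases he : (PySem.Str.lower s == nl) = true
    · simp [he]
    · simp only [he]
      rw [ih]
      cases part with
      | some p => simp
      | none => simp only [Option.isNone_none, Bool.true_and]; split_ifs <;> simp

-- ===== VERDICT (by name: the statement is the Claim_ definition above) =====
theorem normalize_station_name_spec : Claim_equal_normalize_station_name := by
  intro name stations _
  unfold Spec_normalize_station_name normalize_station_name normalize_station_name_alt
  rw [nsnB_loop_eq]
  cases h : nsnA_exact (PySem.Str.strip (PySem.Str.lower name)) stations <;> simp [h]
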